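-- pv_equiv track=rewrite | github.com/B2F1/SSAFY_Algo | 김선엽/2507/3주차/나무 높이_김선엽.py | solution
-- ===== SOURCE A (Python) =====
-- def solution(N, trees):
--     tallest = max(trees)
--     even = 0
--     odd = 0
--     ok = False # 모든 나무의 키가 같지 않음을 확인 하기 위한 변수 입니다.
--     total = 0
--     for tree in trees:
--         if tree < tallest:
--             ok = True
--             minus = tallest - tree
--             total += minus
--             even += minus // 2
--             odd += minus % 2
--     if not ok:  # 모든 나무의 키가 같으므로 0을 return 합니다.
--         return 0
--     else:
--         if even > odd:  ## 처리해야 하는 짝수가 더 많을 경우입니다.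
--             result = 2 * odd    ## 우선 홀수의 2배를 더합니다(1,2,1,2)
--             even -= odd ## 1,2,1,2로 처리했기 때문에 2로 처리한 횟수, 즉, odd를 빼줬습니다.
--             even = even * 2 ## 이제 짝수를 총 자라야 하는 길이로 처리하기 위해 2를 곱합니다.
--             result += (even // 3) * 2   ## 여기서 1과 2가 남았을 때는 날짜를 조절 가능하기 때문에, 3으로 나눕니다.
--             even %= 3 ## 남은 날짜를 1 혹은 2가 남도록 수정합니다.
--             if even == 1: ## 1이 남았을 경우 하루 뒤에 물을 주고 return
--                 result += 1
--             elif even == 2: ## 2가 남았을 경우 하루를 쉬고 다음날 물을 주고 return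
--                 result += 2
--             return result
--         elif even < odd: # 짝수가 더 많을 경우입니다.
--             result = 2 * even # 동일하게 짝수 일만큼 더합니다.
--             odd -= even # 홀수를 짝수만큼 빼줍니다(1 2 1 2)
--             if odd > 1: # 1보다 크다면
--                 result += 2 * (odd - 1) + 1 ## 1 0 1 0 1 식으로 주고 안주고를 반복합니다,.
--             else: # 홀수가 1이면 하루 더 주고 return 합니다.
--                 result += 1
--
--             return result
--         else:
--             return 2 * even
-- ===== SOURCE B (Python) =====
-- def solution(N, trees):
--     tallest = max(trees)
--     total = sum(tallest - t for t in trees)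
--     half = sum((tallest - t) // 2 for t in trees)
--     # binary search for the least number of days D such that the deficits are
--     # realizable with ceil(D/2) '+1'-days and floor(D/2) '+2'-days
--     lo, hi = 0, 2 * total + 1
--     while lo < hi:
--         mid = (lo + hi) // 2
--         if total - (mid + 1) // 2 <= 2 * min(half, mid // 2):
--             hi = mid
--         else:
--             lo = mid + 1
--     return lo
-- ===== Notes on version B (the rewrite author's own statement) =====
-- stated objective: alternative
-- what changed: B replaces A's closed-form case analysis over (even,odd) deficit counts by a binary search for the least day count D whose ceil(D/2) '+1'-days and floor(D/2) '+2'-days can realize all deficits; Pre_ excludes only the empty list, on which both raise ValueError from max().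
import Mathlib
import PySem

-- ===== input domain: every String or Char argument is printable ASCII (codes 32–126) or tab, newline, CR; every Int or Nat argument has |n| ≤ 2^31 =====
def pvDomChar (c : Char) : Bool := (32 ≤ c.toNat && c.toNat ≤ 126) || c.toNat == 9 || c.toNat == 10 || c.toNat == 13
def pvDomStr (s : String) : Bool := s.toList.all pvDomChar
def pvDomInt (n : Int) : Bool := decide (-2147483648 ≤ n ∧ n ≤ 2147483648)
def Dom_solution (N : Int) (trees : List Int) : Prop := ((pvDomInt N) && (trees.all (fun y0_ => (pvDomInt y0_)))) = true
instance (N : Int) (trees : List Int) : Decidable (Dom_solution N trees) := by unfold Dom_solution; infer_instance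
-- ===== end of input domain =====

-- B replaces A's closed-form case analysis by a binary search for the least feasible
-- day count; same return value on every nonempty list (both raise ValueError on []).

-- ===== PORT A =====
def solution (_N : Int) (trees : List Int) : Int :=
  match PySem.List.max? trees (fun y => y) with
  | none => 0  -- max([]) raises ValueError in Python; excluded by Pre_solution
  | some tallest =>
    let st := trees.foldl (fun (s : Int × Int × Bool × Int) tree =>
      if tree < tallest then
        let minus := tallest - tree
        (s.1 + PySem.Int.floordiv minus 2, s.2.1 + PySem.Int.mod minus 2, true, s.2.2.2 + minus)
      else (s.1, s.2.1, s.2.2.1, s.2.2.2)) (0, 0, false, 0)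
    let even := st.1; let odd := st.2.1; let ok := st.2.2.1
    if !ok then 0
    else if even > odd then
      let result := 2 * odd
      let even := even - odd
      let even := even * 2
      let result := result + (PySem.Int.floordiv even 3) * 2
      let even := PySem.Int.mod even 3
      if even == 1 then result + 1
      else if even == 2 then result + 2
      else result
    else if even < odd then
      let result := 2 * even
      let odd := odd - even
      if odd > 1 then result + 2 * (odd - 1) + 1
      else result + 1
    else 2 * even

-- ===== PORT B =====
-- the while-loop of Source B; termination measure (hi - lo)
def bsLoop (half total lo hi : Int) : Int :=
  if h : lo < hi then
    let mid := PySem.Int.floordiv (lo + hi) 2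
    have hmid : lo ≤ mid ∧ mid < hi := by
      constructor
      · exact (PySem.Int.floordiv_two_mid_bounds (le_of_lt h)).1
      · exact (PySem.Int.floordiv_lt_iff_lt_mul (by norm_num)).2 (by omega)
    if total - PySem.Int.floordiv (mid + 1) 2 ≤ 2 * min half (PySem.Int.floordiv mid 2) then
      bsLoop half total lo mid
    else
      bsLoop half total (mid + 1) hi
  else lo
termination_by (hi - lo).toNat
decreasing_by
  · omega
  · omega

def solution_alt (_N : Int) (trees : List Int) : Int :=
  match PySem.List.max? trees (fun y => y) with
  | none => 0  -- max([]) raises ValueError in Python; excluded by Pre_solution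
  | some tallest =>
    let total := (trees.map (fun t => tallest - t)).sum
    let half := (trees.map (fun t => PySem.Int.floordiv (tallest - t) 2)).sum
    bsLoop half total 0 (2 * total + 1)

-- ===== PRECONDITION & SPEC =====
-- Pre_ excludes only the empty list, on which max() raises ValueError in both A and B.
def Pre_solution (N : Int) (trees : List Int) : Prop := trees ≠ []
instance (N : Int) (trees : List Int) : Decidable (Pre_solution N trees) := by unfold Pre_solution; infer_instance
def pvWitness_solution : Int × List Int := (3, [1, 2, 3])

def Spec_solution (N : Int) (trees : List Int) (out : Int) : Prop := out = solution_alt N trees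
instance (N : Int) (trees : List Int) (out : Int) : Decidable (Spec_solution N trees out) := by unfold Spec_solution; infer_instance

-- ===== CLAIM (what is proved, stated in full; the proofs are below) =====
def Claim_equal_solution : Prop := ∀ (N : Int) (trees : List Int), Dom_solution N trees → Pre_solution N trees → Spec_solution N trees (solution N trees)

-- ===== LEMMAS AND PROOFS =====

-- the feasibility condition the binary search decides
def pvC (half total D : Int) : Prop :=
  total - PySem.Int.floordiv (D + 1) 2 ≤ 2 * min half (PySem.Int.floordiv D 2)

theorem pvC_mono {half total D E : Int} (h : pvC half total D) (hDE : D ≤ E) :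
    pvC half total E := by
  unfold pvC at *
  rw [PySem.Int.floordiv_eq_ediv_of_pos (by norm_num), PySem.Int.floordiv_eq_ediv_of_pos (by norm_num)] at h ⊢
  omega

-- the binary search returns the least D satisfying pvC
theorem bsLoop_eq (half total R : Int) :
    ∀ (n : Nat) (lo hi : Int), (hi - lo).toNat ≤ n →
    pvC half total R → (∀ D, D < R → ¬ pvC half total D) →
    lo ≤ R → R ≤ hi → bsLoop half total lo hi = R := by
  intro n
  induction n with
  | zero =>
    intro lo hi hn _ _ h1 h2
    rw [bsLoop]
    have : ¬ lo < hi := by omega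
    simp [this]; omega
  | succ n ih =>
    intro lo hi hn hC hN h1 h2
    rw [bsLoop]
    by_cases h : lo < hi
    · simp only [h, dite_true]
      have hb := PySem.Int.floordiv_two_mid_bounds (le_of_lt h) (lo := lo) (hi := hi)
      have hlt : PySem.Int.floordiv (lo + hi) 2 < hi :=
        (PySem.Int.floordiv_lt_iff_lt_mul (by norm_num)).2 (by omega)
      set mid := PySem.Int.floordiv (lo + hi) 2 with hm
      by_cases hc : total - PySem.Int.floordiv (mid + 1) 2 ≤ 2 * min half (PySem.Int.floordiv mid 2)
      · simp only [hc, if_true]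
        have hRm : R ≤ mid := by
          by_contra hx
          exact hN mid (by omega) hc
        exact ih lo mid (by omega) hC hN h1 hRm
      · simp only [hc, if_false]
        have hRm : mid < R := by
          by_contra hx
          exact hc (pvC_mono hC (by omega))
        exact ih (mid + 1) hi (by omega) hC hN (by omega) h2
    · simp [h]; omega

-- A's closed-form answer is exactly the least feasible day count
theorem formula_least (even odd : Int) (he : 0 ≤ even) (ho : 0 ≤ odd) :
    pvC even (2*even+odd)
      (if even > odd then
        (if PySem.Int.mod ((even - odd) * 2) 3 == 1 then
           2 * odd + PySem.Int.floordiv ((even - odd) * 2) 3 * 2 + 1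
         else if PySem.Int.mod ((even - odd) * 2) 3 == 2 then
           2 * odd + PySem.Int.floordiv ((even - odd) * 2) 3 * 2 + 2
         else 2 * odd + PySem.Int.floordiv ((even - odd) * 2) 3 * 2)
       else if even < odd then
        (if odd - even > 1 then 2 * even + 2 * (odd - even - 1) + 1 else 2 * even + 1)
       else 2 * even) ∧
    (∀ D, D < (if even > odd then
        (if PySem.Int.mod ((even - odd) * 2) 3 == 1 then
           2 * odd + PySem.Int.floordiv ((even - odd) * 2) 3 * 2 + 1
         else if PySem.Int.mod ((even - odd) * 2) 3 == 2 then
           2 * odd + PySem.Int.floordiv ((even - odd) * 2) 3 * 2 + 2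
         else 2 * odd + PySem.Int.floordiv ((even - odd) * 2) 3 * 2)
       else if even < odd then
        (if odd - even > 1 then 2 * even + 2 * (odd - even - 1) + 1 else 2 * even + 1)
       else 2 * even) → ¬ pvC even (2*even+odd) D) ∧
    0 ≤ (if even > odd then
        (if PySem.Int.mod ((even - odd) * 2) 3 == 1 then
           2 * odd + PySem.Int.floordiv ((even - odd) * 2) 3 * 2 + 1
         else if PySem.Int.mod ((even - odd) * 2) 3 == 2 then
           2 * odd + PySem.Int.floordiv ((even - odd) * 2) 3 * 2 + 2
         else 2 * odd + PySem.Int.floordiv ((even - odd) * 2) 3 * 2)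
       else if even < odd then
        (if odd - even > 1 then 2 * even + 2 * (odd - even - 1) + 1 else 2 * even + 1)
       else 2 * even) ∧
    (if even > odd then
        (if PySem.Int.mod ((even - odd) * 2) 3 == 1 then
           2 * odd + PySem.Int.floordiv ((even - odd) * 2) 3 * 2 + 1
         else if PySem.Int.mod ((even - odd) * 2) 3 == 2 then
           2 * odd + PySem.Int.floordiv ((even - odd) * 2) 3 * 2 + 2
         else 2 * odd + PySem.Int.floordiv ((even - odd) * 2) 3 * 2)
       else if even < odd then
        (if odd - even > 1 then 2 * even + 2 * (odd - even - 1) + 1 else 2 * even + 1)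
       else 2 * even) ≤ 2 * (2*even+odd) + 1 := by
  unfold pvC
  simp only [PySem.Int.floordiv_eq_ediv_of_pos (show (0:Int) < 2 by norm_num),
    PySem.Int.floordiv_eq_ediv_of_pos (show (0:Int) < 3 by norm_num),
    PySem.Int.mod_eq_emod_of_pos (show (0:Int) < 3 by norm_num), beq_iff_eq]
  refine ⟨?_, fun D hD => ?_, ?_, ?_⟩ <;> split_ifs at * <;> omega

-- A's fold equals componentwise sums
theorem foldA_char (tallest : Int) : ∀ (l : List Int) (e o tot : Int) (k : Bool),
    l.foldl (fun (s : Int × Int × Bool × Int) tree =>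
      if tree < tallest then
        (s.1 + PySem.Int.floordiv (tallest - tree) 2, s.2.1 + PySem.Int.mod (tallest - tree) 2,
         true, s.2.2.2 + (tallest - tree))
      else (s.1, s.2.1, s.2.2.1, s.2.2.2)) (e, o, k, tot) =
    (e + (l.map (fun t => if t < tallest then PySem.Int.floordiv (tallest - t) 2 else 0)).sum,
     o + (l.map (fun t => if t < tallest then PySem.Int.mod (tallest - t) 2 else 0)).sum,
     k || l.any (fun t => t < tallest),
     tot + (l.map (fun t => if t < tallest then tallest - t else 0)).sum) := by
  intro l
  induction l with
  | nil => intro e o tot k; simp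
  | cons x xs ih =>
    intro e o tot k
    simp only [List.foldl_cons, List.map_cons, List.sum_cons, List.any_cons]
    by_cases hx : x < tallest
    · simp only [hx, if_true, ih, decide_true, Bool.true_or, Bool.or_true]
      refine Prod.ext ?_ (Prod.ext ?_ (Prod.ext ?_ ?_)) <;> simp <;> ring
    · simp only [hx, if_false, ih, decide_false, Bool.false_or]
      refine Prod.ext ?_ (Prod.ext ?_ (Prod.ext ?_ ?_)) <;> simp

-- arithmetic facts about the three deficit sums
theorem sums_char (tallest : Int) : ∀ (l : List Int), (∀ t ∈ l, t ≤ tallest) →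
    (l.map (fun t => tallest - t)).sum =
      2 * (l.map (fun t => PySem.Int.floordiv (tallest - t) 2)).sum +
        (l.map (fun t => PySem.Int.mod (tallest - t) 2)).sum ∧
    0 ≤ (l.map (fun t => PySem.Int.floordiv (tallest - t) 2)).sum ∧
    0 ≤ (l.map (fun t => PySem.Int.mod (tallest - t) 2)).sum ∧
    (l.any (fun t => t < tallest) = false →
      (l.map (fun t => tallest - t)).sum = 0 ∧
      (l.map (fun t => PySem.Int.floordiv (tallest - t) 2)).sum = 0 ∧
      (l.map (fun t => PySem.Int.mod (tallest - t) 2)).sum = 0) := by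
  intro l
  induction l with
  | nil => intro _; simp
  | cons x xs ih =>
    intro hle
    have hx : x ≤ tallest := hle x (by simp)
    obtain ⟨ih1, ih2, ih3, ih4⟩ := ih (fun t ht => hle t (by simp [ht]))
    have h1 := PySem.Int.floordiv_mul_add_mod (tallest - x) 2
    have h2 := PySem.Int.mod_nonneg (tallest - x) (show (0:Int) < 2 by norm_num)
    have h3 := PySem.Int.mod_lt (tallest - x) (show (0:Int) < 2 by norm_num)
    have h4 : 0 ≤ PySem.Int.floordiv (tallest - x) 2 := by
      rw [PySem.Int.floordiv_eq_ediv_of_pos (by norm_num)]; omega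
    simp only [List.map_cons, List.sum_cons, List.any_cons, Bool.or_eq_false_iff,
      decide_eq_false_iff_not, not_lt]
    refine ⟨by omega, by omega, by omega, fun ⟨ha, hb⟩ => ?_⟩
    obtain ⟨c1, c2, c3⟩ := ih4 hb
    have hx0 : tallest - x = 0 := by omega
    rw [hx0] at *
    have h5 : PySem.Int.floordiv 0 2 = 0 := by decide
    have h6 : PySem.Int.mod 0 2 = 0 := by decide
    refine ⟨by omega, by omega, by omega⟩

-- guarded sums equal unguarded sums when tallest bounds the list
theorem sums_if (tallest : Int) : ∀ (l : List Int), (∀ t ∈ l, t ≤ tallest) →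
    (l.map (fun t => if t < tallest then PySem.Int.floordiv (tallest - t) 2 else 0)).sum =
      (l.map (fun t => PySem.Int.floordiv (tallest - t) 2)).sum ∧
    (l.map (fun t => if t < tallest then PySem.Int.mod (tallest - t) 2 else 0)).sum =
      (l.map (fun t => PySem.Int.mod (tallest - t) 2)).sum ∧
    (l.map (fun t => if t < tallest then tallest - t else 0)).sum =
      (l.map (fun t => tallest - t)).sum := by
  intro l
  induction l with
  | nil => intro _; simp
  | cons x xs ih =>
    intro hle
    obtain ⟨i1, i2, i3⟩ := ih (fun t ht => hle t (by simp [ht]))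
    have hx : x ≤ tallest := hle x (by simp)
    by_cases h : x < tallest
    · simp only [List.map_cons, List.sum_cons, h, if_true, i1, i2, i3]
      simp
    · have hx0 : x = tallest := by omega
      subst hx0
      simp only [List.map_cons, List.sum_cons, h, if_false, i1, i2, i3, sub_self]
      refine ⟨?_, ?_, ?_⟩ <;> simp

-- ===== VERDICT (by name: the statement is the Claim_ definition above) =====
theorem solution_spec : Claim_equal_solution := by
  intro N trees _hdom hpre
  unfold Spec_solution
  cases trees with
  | nil => exact absurd rfl hpre
  | cons x t =>
    simp only [solution, solution_alt, PySem.List.max?_id_cons]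
    set M := t.foldl max x with hM
    have hle : ∀ y ∈ (x :: t), y ≤ M := by
      intro y hy
      rcases List.mem_cons.1 hy with h | h
      · rw [h]; exact (PySem.List.le_foldl_max t x).1
      · exact (PySem.List.le_foldl_max t x).2 y h
    rw [foldA_char]
    obtain ⟨i1, i2, i3⟩ := sums_if M (x :: t) hle
    rw [i1, i2, i3]
    obtain ⟨hch, hev, hod, hzero⟩ := sums_char M (x :: t) hle
    simp only [zero_add, Bool.false_or]
    set E := ((x :: t).map (fun tr => PySem.Int.floordiv (M - tr) 2)).sum with hE
    set O := ((x :: t).map (fun tr => PySem.Int.mod (M - tr) 2)).sum with hO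
    set T := ((x :: t).map (fun tr => M - tr)).sum with hT
    by_cases hok : (x :: t).any (fun tr => tr < M)
    · simp only [hok, Bool.not_true]
      have hT' : T = 2 * E + O := hch
      rw [hT']
      obtain ⟨f1, f2, f3, f4⟩ := formula_least E O hev hod
      exact (bsLoop_eq E (2 * E + O) _ ((2 * (2 * E + O) + 1).toNat) 0 (2 * (2 * E + O) + 1)
        (by omega) f1 f2 f3 f4).symm
    · rw [Bool.not_eq_true] at hok
      obtain ⟨z1, z2, z3⟩ := hzero hok
      simp only [hok, Bool.not_false, if_true]
      rw [z1, z2]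
      exact (bsLoop_eq 0 0 0 1 0 1 (by omega) (by unfold pvC; decide)
        (by
          intro D hD
          unfold pvC
          rw [PySem.Int.floordiv_eq_ediv_of_pos (by norm_num),
            PySem.Int.floordiv_eq_ediv_of_pos (by norm_num)]
          omega)
        (by omega) (by omega)).symm
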